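-- pv_equiv track=rewrite | github.com/TencentAILabHealthcare/ERAST | pipeline/utils.py | get_search_result
-- ===== SOURCE A (Python) =====
-- def get_search_result(query_pfam_result, target_pfam_result):
--
--     protein_pair_score_dict = {}
--     for protein in query_pfam_result:
--         protein_pair_score_dict[protein] = []
--
--     for query_protein in query_pfam_result:
--         for target_protein in target_pfam_result:
--             if ((len(query_pfam_result[query_protein])>0) and (len(query_pfam_result[query_protein] & target_pfam_result[target_protein])>0)):
--                 score = 0
--                 protein_pair_score_dict[query_protein].append((target_protein, score))
--
--     return protein_pair_score_dict
-- ===== SOURCE B (Python) =====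
-- def get_search_result(query_pfam_result, target_pfam_result):
--     # inverted index: pfam domain -> set of target proteins carrying it
--     index = {}
--     for target, doms in target_pfam_result.items():
--         for d in doms:
--             index.setdefault(d, set()).add(target)
--     result = {}
--     for query, doms in query_pfam_result.items():
--         matched = set()
--         for d in doms:
--             matched |= index.get(d, set())
--         result[query] = [(t, 0) for t in target_pfam_result if t in matched]
--     return result
-- ===== Notes on version B (the rewrite author's own statement) =====
-- stated objective: faster
-- what changed: Replaces the per-pair set intersection of A's nested query*target loop with an inverted index domain->targets built once; each query unions its domains' postings and matching targets are then read off in target order by a constant-time membership test.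
import Mathlib
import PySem

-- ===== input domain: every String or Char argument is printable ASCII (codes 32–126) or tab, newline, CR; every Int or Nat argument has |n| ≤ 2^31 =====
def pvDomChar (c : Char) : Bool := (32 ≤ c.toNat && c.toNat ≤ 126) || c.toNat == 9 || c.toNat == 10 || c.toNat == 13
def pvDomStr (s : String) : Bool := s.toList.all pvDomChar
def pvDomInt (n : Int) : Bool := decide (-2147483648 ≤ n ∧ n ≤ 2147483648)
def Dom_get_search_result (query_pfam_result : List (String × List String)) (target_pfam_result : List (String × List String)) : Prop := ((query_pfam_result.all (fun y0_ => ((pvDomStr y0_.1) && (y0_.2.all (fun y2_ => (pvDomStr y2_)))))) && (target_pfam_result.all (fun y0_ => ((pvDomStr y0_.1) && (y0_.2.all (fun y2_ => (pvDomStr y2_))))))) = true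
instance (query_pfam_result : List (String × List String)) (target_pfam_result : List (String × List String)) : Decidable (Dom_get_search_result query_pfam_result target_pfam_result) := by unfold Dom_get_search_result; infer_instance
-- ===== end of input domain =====

-- B replaces A's per-pair set intersection by an inverted index domain -> set of targets,
-- built once; return-value equivalence only (neither program mutates its arguments).

-- ===== PORT A =====
def get_search_result (query_pfam_result : List (String × List String)) (target_pfam_result : List (String × List String)) : List (String × List (String × Int)) :=
  let qd : PySem.Dict String (PySem.Set String) :=
    PySem.Dict.ofList (query_pfam_result.map (fun p => (p.1, PySem.Set.ofList p.2)))
  let td : PySem.Dict String (PySem.Set String) :=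
    PySem.Dict.ofList (target_pfam_result.map (fun p => (p.1, PySem.Set.ofList p.2)))
  -- protein_pair_score_dict = {}; for protein in query: dict[protein] = []
  let d0 : PySem.Dict String (List (String × Int)) :=
    qd.keys.foldl (fun d p => d.insert p ([] : List (String × Int))) PySem.Dict.empty
  -- nested loops, appending (target, 0) when the sets intersect
  let d1 := qd.keys.foldl (fun d qp =>
      td.keys.foldl (fun d tp =>
        if 0 < PySem.Set.len (qd.getD qp PySem.Set.empty) ∧
           0 < PySem.Set.len (PySem.Set.inter (qd.getD qp PySem.Set.empty) (td.getD tp PySem.Set.empty))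
        then d.modify qp [] (fun l => l ++ [(tp, (0 : Int))])
        else d) d) d0
  d1.items

-- ===== PORT B =====
-- B-side helpers: explicit recursions, one per loop of Source B.
-- for d in doms: index.setdefault(d, set()).add(target)
def pvAddTarget (target : String) : List String → PySem.Dict String (PySem.Set String) → PySem.Dict String (PySem.Set String)
  | [], index => index
  | dm :: rest, index => pvAddTarget target rest (index.modify dm PySem.Set.empty (fun s => PySem.Set.add s target))

-- for target, doms in target_pfam_result.items(): …
def pvBuildIndex : List (String × List String) → PySem.Dict String (PySem.Set String) → PySem.Dict String (PySem.Set String)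
  | [], index => index
  | (target, doms) :: rest, index => pvBuildIndex rest (pvAddTarget target doms index)

-- for d in doms: matched |= index.get(d, set())
def pvUnionPostings (index : PySem.Dict String (PySem.Set String)) : List String → PySem.Set String → PySem.Set String
  | [], matched => matched
  | dm :: rest, matched => pvUnionPostings index rest (PySem.Set.union matched (index.getD dm PySem.Set.empty))

-- [(t, 0) for t in target_pfam_result if t in matched]
def pvRow (index : PySem.Dict String (PySem.Set String)) (torder : List String) (doms : List String) : List (String × Int) :=
  let matched := pvUnionPostings index doms PySem.Set.empty
  torder.filterMap (fun t => if PySem.Set.contains matched t then some (t, (0 : Int)) else none)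

-- for query, doms in query_pfam_result.items(): … result[query] = …
def pvCollect (index : PySem.Dict String (PySem.Set String)) (torder : List String) : List (String × List String) → PySem.Dict String (List (String × Int)) → PySem.Dict String (List (String × Int))
  | [], result => result
  | (query, doms) :: rest, result => pvCollect index torder rest (result.insert query (pvRow index torder doms))

def get_search_result_alt (query_pfam_result : List (String × List String)) (target_pfam_result : List (String × List String)) : List (String × List (String × Int)) :=
  let tdict := PySem.Dict.ofList target_pfam_result
  let index := pvBuildIndex tdict.items PySem.Dict.empty
  (pvCollect index tdict.keys (PySem.Dict.ofList query_pfam_result).items PySem.Dict.empty).items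

-- ===== PRECONDITION & SPEC =====
def Spec_get_search_result (query_pfam_result : List (String × List String)) (target_pfam_result : List (String × List String)) (out : List (String × List (String × Int))) : Prop := out = get_search_result_alt query_pfam_result target_pfam_result
instance (query_pfam_result : List (String × List String)) (target_pfam_result : List (String × List String)) (out : List (String × List (String × Int))) : Decidable (Spec_get_search_result query_pfam_result target_pfam_result out) := by unfold Spec_get_search_result; infer_instance

-- ===== CLAIM (what is proved, stated in full; the proofs are below) =====
def Claim_equal_get_search_result : Prop := ∀ (query_pfam_result : List (String × List String)) (target_pfam_result : List (String × List String)), Dom_get_search_result query_pfam_result target_pfam_result → Spec_get_search_result query_pfam_result target_pfam_result (get_search_result query_pfam_result target_pfam_result)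

-- ===== LEMMAS AND PROOFS =====

-- A's inner loop: effect on the stored list at any key
lemma pv_innerA_getD (P : String → Prop) [DecidablePred P] (tkeys : List String)
    (qp x : String) (d : PySem.Dict String (List (String × Int))) :
    (tkeys.foldl (fun d tp => if P tp then d.modify qp [] (fun l => l ++ [(tp, (0 : Int))]) else d) d).getD x []
      = if x = qp then d.getD x [] ++ (tkeys.filter (fun tp => decide (P tp))).map (fun tp => (tp, (0 : Int)))
        else d.getD x [] := by
  induction tkeys generalizing d with
  | nil => simp
  | cons t ts ih =>
    simp only [List.foldl_cons, List.filter_cons]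
    by_cases hP : P t
    · rw [if_pos hP, ih]
      by_cases hx : x = qp
      · subst hx; simp [hP]
      · simp [hx, PySem.Dict.getD_modify]
    · rw [if_neg hP, ih]
      simp [hP]

-- A's inner loop does not change the key list (the modified key is present)
lemma pv_innerA_keys (P : String → Prop) [DecidablePred P] (tkeys : List String)
    (qp : String) (d : PySem.Dict String (List (String × Int))) (h : qp ∈ d.keys) :
    (tkeys.foldl (fun d tp => if P tp then d.modify qp [] (fun l => l ++ [(tp, (0 : Int))]) else d) d).keys = d.keys := by
  induction tkeys generalizing d with
  | nil => rfl
  | cons t ts ih =>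
    simp only [List.foldl_cons]
    by_cases hP : P t
    · have hk : (d.modify qp [] (fun l => l ++ [(t, (0 : Int))])).keys = d.keys := by
        rw [PySem.Dict.keys_modify, PySem.Dict.keys_insert_of_contains]
        exact (PySem.Dict.contains_iff_mem_keys _ _).2 h
      rw [if_pos hP, ih _ (by rw [hk]; exact h), hk]
    · rw [if_neg hP, ih _ h]

-- outer fold over distinct keys: value at any key
lemma pv_outer_getD (G : PySem.Dict String (List (String × Int)) → String → PySem.Dict String (List (String × Int)))
    (M : String → List (String × Int))
    (hstep : ∀ d qp x, (G d qp).getD x [] = if x = qp then d.getD x [] ++ M qp else d.getD x [])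
    (keys : List String) (hnd : keys.Nodup) (d : PySem.Dict String (List (String × Int))) (x : String) :
    (keys.foldl G d).getD x [] = if x ∈ keys then d.getD x [] ++ M x else d.getD x [] := by
  induction keys generalizing d with
  | nil => simp
  | cons k ks ih =>
    rcases List.nodup_cons.1 hnd with ⟨hk, hks⟩
    simp only [List.foldl_cons, List.mem_cons]
    rw [ih hks]
    by_cases hx : x = k
    · subst hx; simp [hk, hstep]
    · by_cases hmem : x ∈ ks <;> simp [hx, hmem, hstep]

-- outer fold whose steps preserve the key list
lemma pv_outer_keys (G : PySem.Dict String (List (String × Int)) → String → PySem.Dict String (List (String × Int)))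
    (hstep : ∀ d qp, qp ∈ d.keys → (G d qp).keys = d.keys)
    (keys : List String) (d : PySem.Dict String (List (String × Int))) (hsub : ∀ k ∈ keys, k ∈ d.keys) :
    (keys.foldl G d).keys = d.keys := by
  induction keys generalizing d with
  | nil => rfl
  | cons k ks ih =>
    simp only [List.foldl_cons]
    have h1 : (G d k).keys = d.keys := hstep d k (hsub k (List.mem_cons_self))
    rw [ih _ (fun k' hk' => by rw [h1]; exact hsub k' (List.mem_cons_of_mem _ hk')), h1]

-- the initialization loop stores [] everywhere
lemma pv_d0_getD (keys : List String) (d : PySem.Dict String (List (String × Int))) (x : String)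
    (h : d.getD x [] = []) :
    (keys.foldl (fun d p => d.insert p ([] : List (String × Int))) d).getD x [] = [] := by
  induction keys generalizing d with
  | nil => exact h
  | cons k ks ih =>
    simp only [List.foldl_cons]
    refine ih _ ?_
    rw [PySem.Dict.getD_insert]
    split <;> simp [h]

-- inserting with mapped values maps the items list
lemma pv_insert_map_items (f : List String → PySem.Set String)
    (d : PySem.Dict String (List String)) (d' : PySem.Dict String (PySem.Set String))
    (h : d'.items = d.items.map (fun p => (p.1, f p.2))) (k : String) (v : List String) :
    (d'.insert k (f v)).items = ((d.insert k v).items.map (fun p => (p.1, f p.2))) := by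
  have hc : d'.contains k = d.contains k := by
    rw [PySem.Dict.contains_eq_decide_mem_keys, PySem.Dict.contains_eq_decide_mem_keys]
    have : d'.keys = d.keys := by
      show d'.items.map Prod.fst = d.items.map Prod.fst
      rw [h, List.map_map]; rfl
    rw [this]
  rw [PySem.Dict.items_insert, PySem.Dict.items_insert, hc]
  by_cases hck : d.contains k
  · rw [if_pos hck, if_pos hck, h, List.map_map, List.map_map]
    refine List.map_congr_left (fun p _ => ?_)
    by_cases hp : p.1 = k <;> simp [hp]
  · rw [if_neg hck, if_neg hck, h, List.map_append]
    rfl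

-- Dict.ofList with mapped values: the items list is mapped
lemma pv_ofList_map_items (f : List String → PySem.Set String) (l : List (String × List String))
    (d : PySem.Dict String (List String)) (d' : PySem.Dict String (PySem.Set String))
    (h : d'.items = d.items.map (fun p => (p.1, f p.2))) :
    (l.foldl (fun d p => d.insert p.1 (f p.2)) d').items
      = ((l.foldl (fun d p => d.insert p.1 p.2) d).items.map (fun p => (p.1, f p.2))) := by
  induction l generalizing d d' with
  | nil => exact h
  | cons p ps ih =>
    simp only [List.foldl_cons]
    exact ih _ _ (pv_insert_map_items f d d' h p.1 p.2)

lemma pv_ofList_map (f : List String → PySem.Set String) (l : List (String × List String)) :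
    (PySem.Dict.ofList (l.map (fun p => (p.1, f p.2)))).items
      = ((PySem.Dict.ofList l).items.map (fun p => (p.1, f p.2))) := by
  have : PySem.Dict.ofList (l.map (fun p => (p.1, f p.2)))
      = l.foldl (fun d p => d.insert p.1 (f p.2)) PySem.Dict.empty := by
    show (l.map (fun p => (p.1, f p.2))).foldl (fun d p => d.insert p.1 p.2) PySem.Dict.empty = _
    rw [List.foldl_map]
  rw [this]
  exact pv_ofList_map_items f l PySem.Dict.empty PySem.Dict.empty rfl

-- B: membership in the union of postings
lemma pv_union_mem (ix : PySem.Dict String (PySem.Set String)) (qs : List String) (m : PySem.Set String) (y : String) :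
    (y ∈ pvUnionPostings ix qs m) ↔ y ∈ m ∨ ∃ dom ∈ qs, y ∈ ix.getD dom PySem.Set.empty := by
  induction qs generalizing m with
  | nil => simp [pvUnionPostings]
  | cons q qs ih =>
    simp only [pvUnionPostings, ih, PySem.Set.mem_union, List.mem_cons]
    constructor
    · rintro ((h | h) | ⟨dm, hdm, h⟩)
      · exact Or.inl h
      · exact Or.inr ⟨q, Or.inl rfl, h⟩
      · exact Or.inr ⟨dm, Or.inr hdm, h⟩
    · rintro (h | ⟨dm, (rfl | hdm), h⟩)
      · exact Or.inl (Or.inl h)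
      · exact Or.inl (Or.inr h)
      · exact Or.inr ⟨dm, hdm, h⟩

-- B: one target's domains added to the index
lemma pv_addTarget_mem (doms : List String) (t : String) (d : PySem.Dict String (PySem.Set String)) (x y : String) :
    (y ∈ (pvAddTarget t doms d).getD x PySem.Set.empty)
      ↔ y ∈ d.getD x PySem.Set.empty ∨ (x ∈ doms ∧ y = t) := by
  induction doms generalizing d with
  | nil => simp [pvAddTarget]
  | cons a as ih =>
    simp only [pvAddTarget, ih, PySem.Dict.getD_modify, List.mem_cons]
    by_cases hx : x = a
    · subst hx
      simp [PySem.Set.mem_add]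
      tauto
    · simp only [if_neg hx]
      tauto

-- B: full index characterization
lemma pv_buildIndex_mem (items : List (String × List String)) (d : PySem.Dict String (PySem.Set String)) (x y : String) :
    (y ∈ (pvBuildIndex items d).getD x PySem.Set.empty)
      ↔ y ∈ d.getD x PySem.Set.empty ∨ ∃ pr ∈ items, x ∈ pr.2 ∧ y = pr.1 := by
  induction items generalizing d with
  | nil => simp [pvBuildIndex]
  | cons p ps ih =>
    obtain ⟨t, ds⟩ := p
    simp only [pvBuildIndex, ih, pv_addTarget_mem, List.mem_cons]
    constructor
    · rintro ((h | h) | ⟨pr, hpr, h⟩)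
      · exact Or.inl h
      · exact Or.inr ⟨(t, ds), Or.inl rfl, h⟩
      · exact Or.inr ⟨pr, Or.inr hpr, h⟩
    · rintro (h | ⟨pr, (hpr | hpr), h⟩)
      · exact Or.inl (Or.inl h)
      · exact Or.inl (Or.inr (by rw [hpr] at h; exact h))
      · exact Or.inr ⟨pr, hpr, h⟩

-- B: the result-building loop is a fold of fresh inserts
lemma pv_collect_eq_foldl (ix : PySem.Dict String (PySem.Set String)) (torder : List String)
    (l : List (String × List String)) (r : PySem.Dict String (List (String × Int))) :
    pvCollect ix torder l r = l.foldl (fun r pr => r.insert pr.1 (pvRow ix torder pr.2)) r := by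
  induction l generalizing r with
  | nil => rfl
  | cons p ps ih => obtain ⟨q, ds⟩ := p; simp only [pvCollect, List.foldl_cons]; exact ih _

-- the comprehension: filterMap with an if-some is filter-then-map
lemma pv_filterMap_if (P : String → Bool) (xs : List String) :
    xs.filterMap (fun t => if P t then some (t, (0 : Int)) else none)
      = (xs.filter P).map (fun t => (t, (0 : Int))) := by
  induction xs with
  | nil => rfl
  | cons x xs ih =>
    simp only [List.filterMap_cons, List.filter_cons]
    by_cases h : P x <;> simp [h, ih]

-- a nonempty intersection is an element of both sets
lemma pv_cond_iff (qs ts : PySem.Set String) :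
    (0 < PySem.Set.len qs ∧ 0 < PySem.Set.len (PySem.Set.inter qs ts)) ↔ ∃ dm ∈ qs, dm ∈ ts := by
  constructor
  · rintro ⟨-, h2⟩
    rcases List.exists_mem_of_length_pos (by simpa [PySem.Set.len] using h2) with ⟨dm, hdm⟩
    exact ⟨dm, (PySem.Set.mem_inter qs ts dm).1 hdm⟩
  · rintro ⟨dm, h1, h2⟩
    refine ⟨?_, ?_⟩
    · simp only [PySem.Set.len]
      exact_mod_cast List.length_pos_of_mem h1
    · simp only [PySem.Set.len]
      exact_mod_cast List.length_pos_of_mem ((PySem.Set.mem_inter qs ts dm).2 ⟨h1, h2⟩)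

-- the two items lists agree
theorem pv_main (q t : List (String × List String)) :
    get_search_result q t = get_search_result_alt q t := by
  unfold get_search_result get_search_result_alt
  dsimp only
  set qD : PySem.Dict String (List String) := PySem.Dict.ofList q with hqD
  set tD : PySem.Dict String (List String) := PySem.Dict.ofList t with htD
  set qd : PySem.Dict String (PySem.Set String) :=
    PySem.Dict.ofList (q.map (fun p => (p.1, PySem.Set.ofList p.2))) with hqd
  set td : PySem.Dict String (PySem.Set String) :=
    PySem.Dict.ofList (t.map (fun p => (p.1, PySem.Set.ofList p.2))) with htd
  have hqit : qd.items = qD.items.map (fun p => (p.1, PySem.Set.ofList p.2)) := pv_ofList_map _ q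
  have htit : td.items = tD.items.map (fun p => (p.1, PySem.Set.ofList p.2)) := pv_ofList_map _ t
  have hqkeys : qd.keys = qD.keys := by
    show qd.items.map Prod.fst = qD.items.map Prod.fst
    rw [hqit, List.map_map]; rfl
  have htkeys : td.keys = tD.keys := by
    show td.items.map Prod.fst = tD.items.map Prod.fst
    rw [htit, List.map_map]; rfl
  have hqnd : qd.keys.Nodup := PySem.Dict.nodup_keys_ofList _
  have htnd : td.keys.Nodup := PySem.Dict.nodup_keys_ofList _
  have hqndD : qD.keys.Nodup := PySem.Dict.nodup_keys_ofList _
  have htndD : tD.keys.Nodup := PySem.Dict.nodup_keys_ofList _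
  set ix : PySem.Dict String (PySem.Set String) := pvBuildIndex tD.items PySem.Dict.empty with hix
  set M : String → List (String × Int) := fun qp =>
    (td.keys.filter (fun tp => decide (0 < PySem.Set.len (qd.getD qp PySem.Set.empty) ∧
        0 < PySem.Set.len (PySem.Set.inter (qd.getD qp PySem.Set.empty) (td.getD tp PySem.Set.empty))))).map
      (fun tp => (tp, (0 : Int))) with hM
  have hkeys0 : (qd.keys.foldl (fun d p => d.insert p ([] : List (String × Int))) PySem.Dict.empty).keys = qd.keys := by
    rw [PySem.Dict.keys_foldl_insert]
    exact (PySem.Set.update_empty qd.keys).trans (PySem.Set.ofList_eq_self_of_nodup _ hqnd)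
  have hstepG : ∀ (d : PySem.Dict String (List (String × Int))) (qp x : String),
      (td.keys.foldl (fun d tp =>
          if 0 < PySem.Set.len (qd.getD qp PySem.Set.empty) ∧
             0 < PySem.Set.len (PySem.Set.inter (qd.getD qp PySem.Set.empty) (td.getD tp PySem.Set.empty))
          then d.modify qp [] (fun l => l ++ [(tp, (0 : Int))]) else d) d).getD x []
        = if x = qp then d.getD x [] ++ M qp else d.getD x [] := by
    intro d qp x
    exact pv_innerA_getD (fun tp => 0 < PySem.Set.len (qd.getD qp PySem.Set.empty) ∧
        0 < PySem.Set.len (PySem.Set.inter (qd.getD qp PySem.Set.empty) (td.getD tp PySem.Set.empty)))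
      td.keys qp x d
  have hstepK : ∀ (d : PySem.Dict String (List (String × Int))) (qp : String), qp ∈ d.keys →
      (td.keys.foldl (fun d tp =>
          if 0 < PySem.Set.len (qd.getD qp PySem.Set.empty) ∧
             0 < PySem.Set.len (PySem.Set.inter (qd.getD qp PySem.Set.empty) (td.getD tp PySem.Set.empty))
          then d.modify qp [] (fun l => l ++ [(tp, (0 : Int))]) else d) d).keys = d.keys := by
    intro d qp h
    exact pv_innerA_keys _ _ _ _ h
  set G : PySem.Dict String (List (String × Int)) → String → PySem.Dict String (List (String × Int)) :=
    fun d qp => td.keys.foldl (fun d tp =>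
        if 0 < PySem.Set.len (qd.getD qp PySem.Set.empty) ∧
           0 < PySem.Set.len (PySem.Set.inter (qd.getD qp PySem.Set.empty) (td.getD tp PySem.Set.empty))
        then d.modify qp [] (fun l => l ++ [(tp, (0 : Int))]) else d) d with hG
  set d0 : PySem.Dict String (List (String × Int)) :=
    qd.keys.foldl (fun d p => d.insert p ([] : List (String × Int))) PySem.Dict.empty with hd0
  have hd1keys : (qd.keys.foldl G d0).keys = qd.keys := by
    rw [pv_outer_keys G hstepK qd.keys d0 (fun k hk => by rw [hkeys0]; exact hk), hkeys0]
  have hd1items : (qd.keys.foldl G d0).items = qd.keys.map (fun k => (k, M k)) := by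
    rw [PySem.Dict.items_eq_map_keys _ (by rw [hd1keys]; exact hqnd) [], hd1keys]
    refine List.map_congr_left (fun k hk => ?_)
    rw [pv_outer_getD G M hstepG qd.keys hqnd d0 k, if_pos hk,
      pv_d0_getD qd.keys PySem.Dict.empty k (by simp), List.nil_append]
  -- B's result dict: fresh distinct keys, so its items list is a map
  have hresitems : (pvCollect ix tD.keys qD.items PySem.Dict.empty).items
      = qD.items.map (fun pr => (pr.1, pvRow ix tD.keys pr.2)) := by
    rw [pv_collect_eq_foldl]
    have h := PySem.Dict.items_foldl_insert_fresh qD.items (fun pr => pr.1)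
      (fun pr => pvRow ix tD.keys pr.2) PySem.Dict.empty
      (by intro a _; simp) (by simpa [PySem.Dict.keys] using hqndD)
    simpa using h
  rw [hd1items, hresitems, hqkeys, show qD.keys = qD.items.map Prod.fst from rfl, List.map_map]
  refine List.map_congr_left (fun pr hpr => ?_)
  have hqv : qd.getD pr.1 PySem.Set.empty = PySem.Set.ofList pr.2 := by
    refine PySem.Dict.getD_of_mem_items _ ?_ hqnd _
    rw [hqit]
    exact List.mem_map_of_mem hpr
  simp only [Function.comp, hM, pvRow, pv_filterMap_if]
  congr 1
  rw [hqv, htkeys]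
  congr 1
  refine List.filter_congr (fun tp htp => ?_)
  obtain ⟨pr', hpr', hfst⟩ : ∃ pr' ∈ tD.items, pr'.1 = tp := by
    rw [show tD.keys = tD.items.map Prod.fst from rfl] at htp
    simpa using htp
  subst hfst
  have htv : td.getD pr'.1 PySem.Set.empty = PySem.Set.ofList pr'.2 := by
    refine PySem.Dict.getD_of_mem_items _ ?_ htnd _
    rw [htit]
    exact List.mem_map_of_mem hpr'
  rw [htv]
  have hiff : (0 < PySem.Set.len (PySem.Set.ofList pr.2) ∧
        0 < PySem.Set.len (PySem.Set.inter (PySem.Set.ofList pr.2) (PySem.Set.ofList pr'.2))) ↔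
      pr'.1 ∈ pvUnionPostings ix pr.2 PySem.Set.empty := by
    rw [pv_cond_iff, pv_union_mem]
    constructor
    · rintro ⟨dm, h1, h2⟩
      rw [PySem.Set.mem_ofList] at h1 h2
      refine Or.inr ⟨dm, h1, ?_⟩
      rw [hix, pv_buildIndex_mem]
      exact Or.inr ⟨pr', hpr', h2, rfl⟩
    · rintro (h | ⟨dm, hdm, h⟩)
      · simp at h
      · rw [hix, pv_buildIndex_mem] at h
        rcases h with h | ⟨pr'', hpr'', hdom, heq⟩
        · simp at h
        · have e1 := PySem.Dict.get?_of_mem_items tD hpr' htndD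
          have e2 := PySem.Dict.get?_of_mem_items tD hpr'' htndD
          rw [heq] at e1
          rw [e1] at e2
          rw [Option.some.injEq] at e2
          refine ⟨dm, ?_, ?_⟩
          · rw [PySem.Set.mem_ofList]; exact hdm
          · rw [PySem.Set.mem_ofList, e2]; exact hdom
  rw [Bool.eq_iff_iff]
  simp only [decide_eq_true_eq, PySem.Set.contains_iff]
  exact hiff

-- ===== VERDICT =====
theorem get_search_result_spec : Claim_equal_get_search_result := by
  intro q t _
  exact pv_main q t
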